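-- pv_equiv track=rewrite | github.com/EVADAVA/CanvasGlassNew | app/streamlit_episode_studio.py | compute_step_states
-- ===== SOURCE A (Python) =====
-- PIPELINE_STEPS = [
--     "MS start/test",
--     "ADNA",
--     "NB",
--     "Paintings",
--     "PD",
--     "Wine",
--     "Spotify",
--     "Avatar",
--     "HeyGen prompts",
--     "YouTube package",
-- ]
--
-- STATUS_TO_STEP = {
--     "selected": 0,
--     "adna_ready": 1,
--     "nb_ready": 2,
--     "awaiting_paintings": 3,
--     "pd_ready": 4,
--     "wine_ready": 5,
--     "playlist_ready": 6,
--     "spotify_posted": 6,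
--     "awaiting_spotify_cover_selection": 6,
--     "awaiting_cover_selection": 6,
--     "cover_selected": 6,
--     "avatar_draft_ready": 7,
--     "avatar_final_ready": 8,
--     "heygen_prompt_ready_not_sent": 8,
--     "youtube_package_ready": 9,
--     "published": 9,
-- }
--
-- def compute_step_states(status: str) -> list[str]:
--     current_index = STATUS_TO_STEP.get(status, -1)
--     states: list[str] = []
--     for idx, _ in enumerate(PIPELINE_STEPS):
--         if idx < current_index:
--             states.append("done")
--         elif idx == current_index:
--             states.append("current")
--         else:
--             states.append("pending")
--     return states
-- ===== SOURCE B (Python) =====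
-- PIPELINE_STEPS = [
--     "MS start/test",
--     "ADNA",
--     "NB",
--     "Paintings",
--     "PD",
--     "Wine",
--     "Spotify",
--     "Avatar",
--     "HeyGen prompts",
--     "YouTube package",
-- ]
--
-- STATUS_TO_STEP = {
--     "selected": 0,
--     "adna_ready": 1,
--     "nb_ready": 2,
--     "awaiting_paintings": 3,
--     "pd_ready": 4,
--     "wine_ready": 5,
--     "playlist_ready": 6,
--     "spotify_posted": 6,
--     "awaiting_spotify_cover_selection": 6,
--     "awaiting_cover_selection": 6,
--     "cover_selected": 6,
--     "avatar_draft_ready": 7,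
--     "avatar_final_ready": 8,
--     "heygen_prompt_ready_not_sent": 8,
--     "youtube_package_ready": 9,
--     "published": 9,
-- }
--
-- def compute_step_states(status: str) -> list[str]:
--     n = len(PIPELINE_STEPS)
--     current_index = STATUS_TO_STEP.get(status, -1)
--     done = current_index if current_index >= 0 else 0
--     cur = 1 if 0 <= current_index < n else 0
--     return ["done"] * done + ["current"] * cur + ["pending"] * (n - done - cur)
-- ===== Notes on version B (the rewrite author's own statement) =====
-- stated objective: alternative
-- what changed: B assembles the label list from three run-lengths (done/current/pending counts derived from the looked-up index) by list repetition and concatenation, instead of A's per-step loop with a three-way branch.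
import Mathlib
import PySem

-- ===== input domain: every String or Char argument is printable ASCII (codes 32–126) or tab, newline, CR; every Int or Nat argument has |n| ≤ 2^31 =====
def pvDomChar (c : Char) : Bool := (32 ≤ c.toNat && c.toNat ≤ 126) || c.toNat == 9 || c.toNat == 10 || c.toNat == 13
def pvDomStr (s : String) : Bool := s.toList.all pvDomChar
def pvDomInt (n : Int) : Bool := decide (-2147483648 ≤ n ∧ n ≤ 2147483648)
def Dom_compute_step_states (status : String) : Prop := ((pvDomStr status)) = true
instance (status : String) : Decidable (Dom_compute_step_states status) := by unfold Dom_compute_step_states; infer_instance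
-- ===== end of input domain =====

-- ===== PORT A =====
-- B changes the decomposition: run-length assembly instead of a per-step loop (same cost).
def PIPELINE_STEPS : List String :=
  ["MS start/test", "ADNA", "NB", "Paintings", "PD", "Wine", "Spotify", "Avatar",
   "HeyGen prompts", "YouTube package"]

def STATUS_TO_STEP : PySem.Dict String Int :=
  PySem.Dict.ofList
    [("selected", 0), ("adna_ready", 1), ("nb_ready", 2), ("awaiting_paintings", 3),
     ("pd_ready", 4), ("wine_ready", 5), ("playlist_ready", 6), ("spotify_posted", 6),
     ("awaiting_spotify_cover_selection", 6), ("awaiting_cover_selection", 6),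
     ("cover_selected", 6), ("avatar_draft_ready", 7), ("avatar_final_ready", 8),
     ("heygen_prompt_ready_not_sent", 8), ("youtube_package_ready", 9), ("published", 9)]

def compute_step_states (status : String) : List String :=
  let current_index : Int := PySem.Dict.getD STATUS_TO_STEP status (-1)
  (PySem.List.enumerate PIPELINE_STEPS).foldl
    (fun states p =>
      if p.1 < current_index then states ++ ["done"]
      else if p.1 = current_index then states ++ ["current"]
      else states ++ ["pending"]) []

-- ===== PORT B =====
def compute_step_states_alt (status : String) : List String :=
  let n : Int := PIPELINE_STEPS.length
  let current_index : Int := PySem.Dict.getD STATUS_TO_STEP status (-1)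
  let done : Int := if 0 ≤ current_index then current_index else 0
  let cur : Int := if 0 ≤ current_index ∧ current_index < n then 1 else 0
  List.replicate done.toNat "done" ++ List.replicate cur.toNat "current" ++
    List.replicate (n - done - cur).toNat "pending"

-- ===== PRECONDITION & SPEC =====
def Spec_compute_step_states (status : String) (out : List String) : Prop := out = compute_step_states_alt status
instance (status : String) (out : List String) : Decidable (Spec_compute_step_states status out) := by unfold Spec_compute_step_states; infer_instance

-- ===== CLAIM (what is proved, stated in full; the proofs are below) =====
def Claim_equal_compute_step_states : Prop := ∀ (status : String), Dom_compute_step_states status → Spec_compute_step_states status (compute_step_states status)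

-- ===== LEMMAS AND PROOFS =====
-- the lookup can only return one of the dict's values or the default -1
lemma lookup_mem (s : String) :
    PySem.Dict.getD STATUS_TO_STEP s (-1) ∈ ([-1, 0, 1, 2, 3, 4, 5, 6, 7, 8, 9] : List Int) := by
  rw [PySem.Dict.getD_eq_get?_getD]
  cases h : PySem.Dict.get? STATUS_TO_STEP s with
  | none => simp
  | some v =>
    have hv : v ∈ PySem.Dict.values STATUS_TO_STEP :=
      List.mem_map_of_mem (PySem.Dict.mem_items_of_get?_eq_some _ h)
    have hvals : PySem.Dict.values STATUS_TO_STEP = [0, 1, 2, 3, 4, 5, 6, 6, 6, 6, 6, 7, 8, 8, 9, 9] := by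
      decide
    rw [hvals] at hv
    simp only [Option.getD_some]
    fin_cases hv <;> decide

-- both ports as a function of the looked-up index
lemma ports_eq_of_idx (s : String) (c : Int)
    (hc : PySem.Dict.getD STATUS_TO_STEP s (-1) = c)
    (hmem : c ∈ ([-1, 0, 1, 2, 3, 4, 5, 6, 7, 8, 9] : List Int)) :
    compute_step_states s = compute_step_states_alt s := by
  unfold compute_step_states compute_step_states_alt
  rw [hc]
  fin_cases hmem <;> decide

-- ===== VERDICT (by name: the statement is the Claim_ definition above) =====
theorem compute_step_states_spec : Claim_equal_compute_step_states := by
  intro status _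
  unfold Spec_compute_step_states
  exact ports_eq_of_idx status _ rfl (lookup_mem status)
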